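-- pv_equiv track=rewrite | github.com/shrezaaa/AI | Genetic Algorithm.py | binary_permutations
-- ===== SOURCE A (Python) =====
-- from itertools import combinations
--
-- def binary_permutations(binary_list):
--     for comb in combinations(range(len(binary_list)), binary_list.count(1)):
--         result = [0] * len(binary_list)
--         for i in comb:
--             result[i] = 1
--         if binary_list.count(1) > 1:
--             count = 0
--             max_ones = 0
--             for i in range(0, len(result)):
--                 if (result[i] == 0):
--                     count = 0
--                 else:
--                     count += 1
--                     max_ones = max(max_ones, count)
--             if max_ones == binary_list.count(1):
--                 yield result
--         else:
--             yield result
-- ===== SOURCE B (Python) =====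
-- def binary_permutations(binary_list):
--     n = len(binary_list)
--     k = binary_list.count(1)
--     if k == 0:
--         yield [0] * n
--     else:
--         for s in range(n - k + 1):
--             yield [0] * s + [1] * k + [0] * (n - k - s)
-- ===== Notes on version B (the rewrite author's own statement) =====
-- stated objective: alternative
-- what changed: Instead of enumerating all C(n,k) position combinations and filtering those whose ones form one contiguous run, B directly emits the n-k+1 sliding windows of k ones (one all-zeros list when k=0).
import Mathlib
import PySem

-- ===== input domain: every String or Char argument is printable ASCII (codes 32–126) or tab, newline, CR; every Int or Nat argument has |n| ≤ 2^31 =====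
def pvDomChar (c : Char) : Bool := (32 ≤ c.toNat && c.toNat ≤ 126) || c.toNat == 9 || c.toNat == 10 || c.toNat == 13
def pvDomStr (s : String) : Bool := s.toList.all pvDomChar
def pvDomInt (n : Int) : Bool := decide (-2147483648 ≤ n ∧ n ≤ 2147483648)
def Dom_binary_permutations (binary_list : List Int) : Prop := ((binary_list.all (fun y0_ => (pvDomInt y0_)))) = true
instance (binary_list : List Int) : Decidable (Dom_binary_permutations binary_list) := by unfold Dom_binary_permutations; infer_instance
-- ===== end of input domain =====

-- B replaces A's enumerate-all-C(n,k)-combinations-and-filter-contiguous by directly emitting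
-- the n-k+1 sliding windows of k contiguous ones (a different, direct algorithm).

-- ===== PORT A =====
-- itertools.combinations(l, k) in lexicographic order (indices drawn from l in order)
def combosA (l : List Nat) (k : Nat) : List (List Nat) :=
  match k, l with
  | 0, _ => [[]]
  | Nat.succ k', x :: xs => ((combosA xs k').map (fun c => x :: c)) ++ combosA xs (Nat.succ k')
  | Nat.succ _, [] => []

def binary_permutations (binary_list : List Int) : List (List Int) :=
  let n := binary_list.length
  let k := binary_list.count 1
  (combosA (List.range n) k).foldl (fun acc comb =>
    -- result = [0]*n; for i in comb: result[i] = 1  (every i < n, so List.set is exact here)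
    let result := comb.foldl (fun r i => r.set i 1) (List.replicate n (0:Int))
    if 1 < k then
      -- count/max_ones scan: for i in range(0, len(result))
      let st := (PySem.List.pyRange 0 (result.length : Int) 1).foldl
        (fun (p : Nat × Nat) i =>
          if PySem.List.pyGetD result i 0 = 0 then (0, p.2) else (p.1 + 1, max p.2 (p.1 + 1)))
        (0, 0)
      if st.2 = k then acc ++ [result] else acc
    else acc ++ [result]) []

-- ===== PORT B =====
def binary_permutations_alt (binary_list : List Int) : List (List Int) :=
  let n := binary_list.length
  let k := binary_list.count 1
  if k = 0 then [List.replicate n 0]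
  else (List.range (n - k + 1)).map
    (fun s => List.replicate s (0:Int) ++ List.replicate k 1 ++ List.replicate (n - k - s) 0)

-- ===== PRECONDITION & SPEC =====
def Spec_binary_permutations (binary_list : List Int) (out : List (List Int)) : Prop := out = binary_permutations_alt binary_list
instance (binary_list : List Int) (out : List (List Int)) : Decidable (Spec_binary_permutations binary_list out) := by unfold Spec_binary_permutations; infer_instance

-- ===== CLAIM (what is proved, stated in full; the proofs are below) =====
def Claim_equal_binary_permutations : Prop := ∀ (binary_list : List Int), Dom_binary_permutations binary_list → Spec_binary_permutations binary_list (binary_permutations binary_list)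

-- ===== LEMMAS AND PROOFS =====

-- the indicator list of a set of positions
def ind (n : Nat) (c : List Nat) : List Int := (List.range n).map (fun j => if j ∈ c then 1 else 0)

-- structural form of A's count/max_ones scan
def runFold : List Int → Nat → Nat → Nat
  | [], _, m => m
  | x :: r, c, m => if x = 0 then runFold r 0 m else runFold r (c + 1) (max m (c + 1))

-- "c is a block of consecutive positions of length k"
def isInt (k : Nat) (c : List Nat) : Bool := c == List.range' (c.headD 0) k

lemma foldl_set_length (c : List Nat) (r : List Int) :
    (c.foldl (fun r i => r.set i 1) r).length = r.length := by
  induction c generalizing r with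
  | nil => rfl
  | cons i c ih => simp [List.foldl_cons, ih]

lemma foldl_set_getElem (c : List Nat) (r : List Int) (j : Nat) (hj : j < r.length) :
    (c.foldl (fun r i => r.set i 1) r)[j]? = some (if j ∈ c then 1 else r[j]) := by
  induction c generalizing r with
  | nil => simp [List.getElem?_eq_getElem hj]
  | cons i c ih =>
    rw [List.foldl_cons, ih (r.set i 1) (by simpa using hj)]
    rw [List.getElem_set (by simpa using hj)]
    by_cases h1 : j ∈ c <;> by_cases h2 : i = j <;> simp [h1, h2, List.mem_cons] <;> omega

lemma build_eq_ind (c : List Nat) (n : Nat) (h : ∀ i ∈ c, i < n) :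
    c.foldl (fun r i => r.set i 1) (List.replicate n (0:Int)) = ind n c := by
  apply List.ext_getElem?
  intro j
  by_cases hj : j < n
  · rw [foldl_set_getElem c _ j (by simpa using hj)]
    simp [ind, List.getElem?_eq_getElem, hj, List.getElem_replicate]
  · have h1 : (c.foldl (fun r i => r.set i 1) (List.replicate n (0:Int))).length ≤ j := by
      rw [foldl_set_length]; simp; omega
    rw [List.getElem?_eq_none h1, List.getElem?_eq_none (by simp [ind]; omega)]

lemma foldl_eq_runFold (r : List Int) (c m : Nat) :
    (r.foldl (fun (p : Nat × Nat) x =>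
      if x = 0 then (0, p.2) else (p.1 + 1, max p.2 (p.1 + 1))) (c, m)).2 = runFold r c m := by
  induction r generalizing c m with
  | nil => rfl
  | cons x r ih => by_cases hx : x = 0 <;> simp [runFold, hx, ih]

lemma rf_zeros (t c m : Nat) : runFold (List.replicate t (0:Int)) c m = m := by
  induction t generalizing c <;> simp [runFold, List.replicate_succ, *]

lemma rf_zeros_append (s : Nat) (r : List Int) (m : Nat) :
    runFold (List.replicate s 0 ++ r) 0 m = runFold r 0 m := by
  induction s <;> simp [runFold, List.replicate_succ, *]

lemma rf_ones_append (k : Nat) (r : List Int) (c m : Nat) :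
    runFold (List.replicate (k + 1) 1 ++ r) c m = runFold r (c + k + 1) (max m (c + k + 1)) := by
  induction k generalizing c m with
  | zero => simp [runFold]
  | succ k ih =>
    rw [List.replicate_succ, List.cons_append]
    show runFold _ _ _ = _
    simp only [runFold, if_neg one_ne_zero, ih]
    congr 1 <;> omega

def h01 (r : List Int) : Prop := ∀ x ∈ r, x = 0 ∨ x = 1

lemma rf_le (r : List Int) (c m : Nat) (h : h01 r) :
    runFold r c m ≤ max m (c + r.count 1) := by
  induction r generalizing c m with
  | nil => simp [runFold]
  | cons x r ih =>
    have hr : h01 r := fun y hy => h y (by simp [hy])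
    rcases h x (by simp) with rfl | rfl
    · have h2 := ih 0 m hr
      have h3 : runFold (0 :: r) c m = runFold r 0 m := by simp [runFold]
      have h4 : (0 :: r).count 1 = r.count 1 := by simp
      rw [h3, h4]
      omega
    · have h2 := ih (c + 1) (max m (c + 1)) hr
      have h3 : runFold (1 :: r) c m = runFold r (c + 1) (max m (c + 1)) := by
        simp [runFold]
      have h4 : (1 :: r).count 1 = r.count 1 + 1 := by simp
      rw [h3, h4]
      omega

lemma all_zeros (r : List Int) (h : h01 r) (h0 : r.count 1 = 0) :
    r = List.replicate r.length 0 := by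
  apply List.eq_replicate_of_mem
  intro x hx
  rcases h x hx with rfl | rfl
  · rfl
  · rw [List.count_eq_zero] at h0; exact absurd hx h0

lemma rf_run (r : List Int) (c m : Nat) (h : h01 r) (hc : 1 ≤ c)
    (hm : m < c + r.count 1) (hk : 1 ≤ r.count 1)
    (he : runFold r c m = c + r.count 1) :
    ∃ t, r = List.replicate (r.count 1) 1 ++ List.replicate t 0 := by
  induction r generalizing c m with
  | nil => simp at hk
  | cons x r ih =>
    have hr : h01 r := fun y hy => h y (by simp [hy])
    rcases h x (by simp) with rfl | rfl
    · exfalso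
      have h3 : runFold (0 :: r) c m = runFold r 0 m := by simp [runFold]
      have h4 : (0 :: r).count 1 = r.count 1 := by simp
      have h5 := rf_le r 0 m hr
      rw [h3, h4] at he
      omega
    · have h3 : runFold (1 :: r) c m = runFold r (c + 1) (max m (c + 1)) := by
        simp [runFold]
      have h4 : (1 :: r).count 1 = r.count 1 + 1 := by simp
      rw [h3, h4] at he
      rw [h4]
      by_cases hcr : r.count 1 = 0
      · refine ⟨r.length, ?_⟩
        have hz := all_zeros r hr hcr
        rw [hcr]
        simpa [List.replicate_succ] using hz
      · obtain ⟨t, ht⟩ := ih (c + 1) (max m (c + 1)) hr (by omega) (by omega) (by omega)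
          (by rw [he]; omega)
        exact ⟨t, by rw [List.replicate_succ, List.cons_append, ← ht]⟩

lemma rf_shape (r : List Int) (m : Nat) (h : h01 r)
    (hm : m < r.count 1) (hk : 1 ≤ r.count 1)
    (he : runFold r 0 m = r.count 1) :
    ∃ s t, r = List.replicate s 0 ++ List.replicate (r.count 1) 1 ++ List.replicate t 0 := by
  induction r generalizing m with
  | nil => simp at hk
  | cons x r ih =>
    have hr : h01 r := fun y hy => h y (by simp [hy])
    rcases h x (by simp) with rfl | rfl
    · have h3 : runFold (0 :: r) 0 m = runFold r 0 m := by simp [runFold]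
      have h4 : (0 :: r).count 1 = r.count 1 := by simp
      rw [h3, h4] at he
      rw [h4] at hm hk ⊢
      obtain ⟨s, t, hst⟩ := ih m hr hm hk he
      refine ⟨s + 1, t, ?_⟩
      conv_lhs => rw [hst]
      simp only [List.replicate_succ, List.cons_append]
    · have h3 : runFold (1 :: r) 0 m = runFold r 1 (max m 1) := by simp [runFold]
      have h4 : (1 :: r).count 1 = r.count 1 + 1 := by simp
      rw [h3, h4] at he
      rw [h4]
      by_cases hcr : r.count 1 = 0
      · refine ⟨0, r.length, ?_⟩
        have hz := all_zeros r hr hcr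
        rw [hcr]
        simpa [List.replicate_succ] using hz
      · obtain ⟨t, ht⟩ := rf_run r 1 (max m 1) hr le_rfl (by omega) (by omega) (by rw [he]; omega)
        refine ⟨0, t, ?_⟩
        conv_lhs => rw [ht]
        simp only [List.replicate_zero, List.nil_append, List.replicate_succ, List.cons_append]

lemma h01_ind (n : Nat) (c : List Nat) : h01 (ind n c) := by
  intro x hx
  simp only [ind, List.mem_map] at hx
  obtain ⟨j, -, rfl⟩ := hx
  split <;> simp

lemma count_ind (n : Nat) (c : List Nat) (hn : c.Nodup) (h : ∀ i ∈ c, i < n) :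
    (ind n c).count 1 = c.length := by
  have h1 : (ind n c).count 1 = ((List.range n).filter (fun j => decide (j ∈ c))).length := by
    rw [ind, List.count, List.countP_map, List.countP_eq_length_filter]
    congr 1
    apply List.filter_congr
    intro j _
    by_cases hj : j ∈ c <;> simp [hj]
  rw [h1]
  have hperm : ((List.range n).filter (fun j => decide (j ∈ c))).Perm c := by
    apply (List.perm_ext_iff_of_nodup (List.Nodup.filter _ (List.nodup_range)) hn).mpr
    intro x
    simp only [List.mem_filter, List.mem_range, decide_eq_true_eq]
    exact ⟨fun ⟨_, hx⟩ => hx, fun hx => ⟨h x hx, hx⟩⟩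
  exact hperm.length_eq

lemma ind_interval (n s k : Nat) (h : s + k ≤ n) :
    ind n (List.range' s k) =
      List.replicate s 0 ++ List.replicate k 1 ++ List.replicate (n - s - k) 0 := by
  have hsplit : List.range n = List.range' 0 s ++ List.range' s k ++ List.range' (s + k) (n - s - k) := by
    rw [List.range_eq_range', show n = s + (k + (n - s - k)) by omega,
      ← List.range'_append_1, ← List.range'_append_1]
    simp [List.append_assoc]
  rw [ind, hsplit, List.map_append, List.map_append]
  congr 1
  · congr 1
    · rw [List.eq_replicate_iff]
      refine ⟨by simp, ?_⟩
      intro b hb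
      simp only [List.mem_map] at hb
      obtain ⟨j, hj, rfl⟩ := hb
      rw [List.mem_range'_1] at hj
      rw [if_neg (by rw [List.mem_range'_1]; omega)]
    · rw [List.eq_replicate_iff]
      refine ⟨by simp, ?_⟩
      intro b hb
      simp only [List.mem_map] at hb
      obtain ⟨j, hj, rfl⟩ := hb
      rw [List.mem_range'_1] at hj
      rw [if_pos (by rw [List.mem_range'_1]; omega)]
  · rw [List.eq_replicate_iff]
    refine ⟨by simp, ?_⟩
    intro b hb
    simp only [List.mem_map] at hb
    obtain ⟨j, hj, rfl⟩ := hb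
    rw [List.mem_range'_1] at hj
    rw [if_neg (by rw [List.mem_range'_1]; omega)]

lemma combos_sublist (l : List Nat) (k : Nat) (cb : List Nat) (h : cb ∈ combosA l k) :
    cb.Sublist l ∧ cb.length = k := by
  induction l generalizing k cb with
  | nil =>
    cases k <;> simp [combosA] at h
    subst h; simp
  | cons x xs ih =>
    cases k with
    | zero => simp [combosA] at h; subst h; simp
    | succ k' =>
      simp only [combosA, List.mem_append, List.mem_map] at h
      rcases h with ⟨c, hc, rfl⟩ | h
      · obtain ⟨hs, hl⟩ := ih k' c hc
        exact ⟨List.Sublist.cons₂ x hs, by simp [hl]⟩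
      · obtain ⟨hs, hl⟩ := ih (k' + 1) cb h
        exact ⟨hs.cons x, hl⟩

lemma mem_combos (l : List Nat) (k : Nat) (cb : List Nat) (hs : cb.Sublist l) (hl : cb.length = k) :
    cb ∈ combosA l k := by
  induction l generalizing k cb with
  | nil =>
    rw [List.sublist_nil] at hs
    subst hs; subst hl; simp [combosA]
  | cons x xs ih =>
    cases cb with
    | nil => subst hl; simp [combosA]
    | cons y c =>
      subst hl
      cases hs with
      | cons _ h =>
        simp only [List.length_cons, combosA, List.mem_append]
        exact Or.inr (ih (c.length + 1) (y :: c) h rfl)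
      | cons₂ _ h =>
        simp only [List.length_cons, combosA, List.mem_append, List.mem_map]
        exact Or.inl ⟨c, ih c.length c h rfl, rfl⟩

lemma combos_nodup (l : List Nat) (k : Nat) (h : l.Nodup) : (combosA l k).Nodup := by
  induction l generalizing k with
  | nil => cases k <;> simp [combosA]
  | cons x xs ih =>
    have hx : x ∉ xs := (List.nodup_cons.mp h).1
    have hxs : xs.Nodup := (List.nodup_cons.mp h).2
    cases k with
    | zero => simp [combosA]
    | succ k' =>
      simp only [combosA]
      apply List.Nodup.append
      · exact (ih k' hxs).map (fun a b hab => by simpa using hab)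
      · exact ih (k' + 1) hxs
      · intro a ha hb
        simp only [List.mem_map] at ha
        obtain ⟨c, -, rfl⟩ := ha
        have := (combos_sublist xs (k' + 1) (x :: c) hb).1
        exact hx (this.subset (by simp))

lemma combos_one (l : List Nat) : combosA l 1 = l.map (fun x => [x]) := by
  induction l <;> simp [combosA, *]

lemma combos_zero (l : List Nat) : combosA l 0 = [[]] := by cases l <;> rfl

lemma isInt_cons (k a : Nat) (c : List Nat) :
    isInt (k + 1) (a :: c) = (c == List.range' (a + 1) k) := by
  rw [isInt, List.headD_cons, List.range'_succ]
  cases h : c == List.range' (a + 1) k <;> simp_all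

lemma filter_eq_of_nodup (l : List (List Nat)) (a : List Nat) (h : l.Nodup) :
    l.filter (· == a) = if a ∈ l then [a] else [] := by
  rw [List.filter_beq]
  by_cases hm : a ∈ l
  · rw [if_pos hm, List.count_eq_one_of_mem h hm, List.replicate_one]
  · rw [if_neg hm, List.count_eq_zero.mpr hm, List.replicate_zero]

lemma range'_prefix (a k n : Nat) (h : k ≤ n) :
    (List.range' a k).Sublist (List.range' a n) := by
  rw [show n = k + (n - k) by omega, ← List.range'_append_1]
  exact List.sublist_append_left _ _

lemma assemble (a K n : Nat) (hK : 1 ≤ K) (hle : K ≤ n + 1) :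
    (List.range' a K) :: (List.range (n + 1 - K)).map (fun j => List.range' (a + 1 + j) K) =
      (List.range (n + 2 - K)).map (fun j => List.range' (a + j) K) := by
  rw [show n + 2 - K = (n + 1 - K) + 1 by omega, List.range_succ_eq_map, List.map_cons, List.map_map]
  have h2 : ((List.range (n + 1 - K)).map (fun j => List.range' (a + 1 + j) K)) =
      (List.range (n + 1 - K)).map ((fun j => List.range' (a + j) K) ∘ Nat.succ) := by
    apply List.map_congr_left
    intro j hj
    exact congrArg (fun t => List.range' t K) (by omega)
  rw [h2]
  rfl

lemma C3 (n a k : Nat) (hk : 1 ≤ k) :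
    (combosA (List.range' a n) k).filter (isInt k) =
      (List.range (n + 1 - k)).map (fun j => List.range' (a + j) k) := by
  induction n generalizing a with
  | zero =>
    obtain ⟨k', rfl⟩ : ∃ k', k = k' + 1 := ⟨k - 1, by omega⟩
    simp [combosA]
  | succ n ih =>
    obtain ⟨k', rfl⟩ : ∃ k', k = k' + 1 := ⟨k - 1, by omega⟩
    rw [List.range'_succ]
    rw [show combosA (a :: List.range' (a + 1) n) (k' + 1) =
      ((combosA (List.range' (a + 1) n) k').map (fun c => a :: c)) ++
        combosA (List.range' (a + 1) n) (k' + 1) from rfl]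
    rw [List.filter_append, List.filter_map]
    have hcomp : (isInt (k' + 1) ∘ fun c => a :: c) = fun c => c == List.range' (a + 1) k' := by
      funext c; exact isInt_cons k' a c
    rw [hcomp]
    cases k' with
    | zero =>
      have h1 : (combosA (List.range' (a + 1) n) 0).filter (fun c => c == List.range' (a + 1) 0) = [[]] := by
        rw [combos_zero]; simp
      rw [ih (a + 1), h1]
      have e1 : (List.map (fun c => a :: c) [[]] : List (List Nat)) = [List.range' a (0 + 1)] := by simp
      rw [e1, List.singleton_append]
      exact assemble a (0 + 1) n (by omega) (by omega)
    | succ k'' =>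
      have hnody := combos_nodup (List.range' (a + 1) n) (k'' + 1) List.nodup_range'
      rw [filter_eq_of_nodup _ _ hnody, ih (a + 1)]
      by_cases hle : k'' + 1 ≤ n
      · rw [if_pos (mem_combos _ _ _ (range'_prefix (a + 1) (k'' + 1) n hle) (by simp))]
        have e1 : List.map (fun c => a :: c) [List.range' (a + 1) (k'' + 1)] =
            [List.range' a (k'' + 2)] := by
          simp [List.range'_succ]
        rw [e1, List.singleton_append]
        exact assemble a (k'' + 2) n (by omega) (by omega)
      · rw [if_neg (fun hmem => by
          have h2 := (combos_sublist _ _ _ hmem).1.length_le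
          simp at h2
          omega)]
        rw [show n + 1 - (k'' + 1 + 1) = 0 by omega, show n + 1 + 1 - (k'' + 1 + 1) = 0 by omega]
        simp

lemma ind_mem_iff (n : Nat) (c d : List Nat) (hc : ∀ i ∈ c, i < n) (hd : ∀ i ∈ d, i < n)
    (h : ind n c = ind n d) (j : Nat) : j ∈ c ↔ j ∈ d := by
  by_cases hj : j < n
  · have h2 : (ind n c)[j]? = (ind n d)[j]? := by rw [h]
    simp only [ind, List.getElem?_map, List.getElem?_range, hj, if_pos] at h2
    by_cases h3 : j ∈ c <;> by_cases h4 : j ∈ d <;> simp [h3, h4] at h2 <;> tauto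
  · exact ⟨fun hmem => absurd (hc j hmem) hj, fun hmem => absurd (hd j hmem) hj⟩

lemma sorted_eq_of_mem (c d : List Nat) (hc : c.Pairwise (· < ·)) (hd : d.Pairwise (· < ·))
    (h : ∀ j, j ∈ c ↔ j ∈ d) : c = d := by
  have hcn : c.Nodup := hc.imp (fun h => Nat.ne_of_lt h)
  have hdn : d.Nodup := hd.imp (fun h => Nat.ne_of_lt h)
  exact List.Perm.eq_of_pairwise (fun a b _ _ h1 h2 => by omega) hc hd
    ((List.perm_ext_iff_of_nodup hcn hdn).mpr h)

lemma isInt_range' (s k : Nat) (hk : 1 ≤ k) : isInt k (List.range' s k) = true := by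
  obtain ⟨k', rfl⟩ : ∃ k', k = k' + 1 := ⟨k - 1, by omega⟩
  rw [isInt, List.range'_succ, List.headD_cons, ← List.range'_succ]
  simp

-- A's filter predicate agrees with isInt on members of combosA (range n) k, for k ≥ 2
lemma pred_iff (n k : Nat) (hk : 2 ≤ k) (cb : List Nat) (hm : cb ∈ combosA (List.range n) k) :
    (runFold (ind n cb) 0 0 = k) ↔ isInt k cb = true := by
  obtain ⟨hsub, hlen⟩ := combos_sublist _ _ _ hm
  have hsort : cb.Pairwise (· < ·) := List.Pairwise.sublist hsub List.pairwise_lt_range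
  have hnod : cb.Nodup := hsort.imp (fun h => Nat.ne_of_lt h)
  have hlt : ∀ i ∈ cb, i < n := fun i hi => List.mem_range.mp (hsub.subset hi)
  have hcount : (ind n cb).count 1 = k := by rw [count_ind n cb hnod hlt, hlen]
  have hlenind : (ind n cb).length = n := by simp [ind]
  constructor
  · intro he
    obtain ⟨s, t, hst⟩ := rf_shape (ind n cb) 0 (h01_ind n cb)
      (by omega) (by omega) (by rw [hcount]; exact he)
    rw [hcount] at hst
    have hlens : s + k + t = n := by
      have h5 := congrArg List.length hst
      simp only [hlenind, List.length_append, List.length_replicate] at h5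
      omega
    have hskn : s + k ≤ n := by omega
    have ht : t = n - s - k := by omega
    have hmemiff : ∀ j, j ∈ cb ↔ j ∈ List.range' s k := by
      apply ind_mem_iff n cb (List.range' s k) hlt
      · intro i hi
        rw [List.mem_range'_1] at hi
        omega
      · rw [hst, ht, ind_interval n s k hskn]
    have hcb : cb = List.range' s k :=
      sorted_eq_of_mem cb (List.range' s k) hsort
        (List.pairwise_lt_range' 1) hmemiff
    rw [hcb]
    exact isInt_range' s k (by omega)
  · intro hi
    rw [isInt] at hi
    have hcb : cb = List.range' (cb.headD 0) k := by simpa using hi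
    set s := cb.headD 0 with hs
    have hskn : s + k ≤ n := by
      have hmem : s + (k - 1) ∈ cb := by
        rw [hcb, List.mem_range'_1]
        omega
      have h6 := hlt _ hmem
      omega
    rw [hcb, ind_interval n s k hskn]
    obtain ⟨k', rfl⟩ : ∃ k', k = k' + 1 := ⟨k - 1, by omega⟩
    rw [List.append_assoc, rf_zeros_append, rf_ones_append, rf_zeros]
    omega

lemma portA_eq (bl : List Int) : binary_permutations bl =
    (combosA (List.range bl.length) (bl.count 1)).foldl (fun acc comb =>
       if 1 < bl.count 1 then
         (if (fun cb : List Nat => decide (runFold (cb.foldl (fun r i => r.set i 1) (List.replicate bl.length (0:Int))) 0 0 = bl.count 1)) comb = true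
          then acc ++ [(fun cb : List Nat => cb.foldl (fun r i => r.set i 1) (List.replicate bl.length (0:Int))) comb] else acc)
       else acc ++ [comb.foldl (fun r i => r.set i 1) (List.replicate bl.length (0:Int))]) [] := by
  simp only [binary_permutations]
  congr 1
  funext acc comb
  rw [PySem.List.foldl_pyRange_zero_pyGetD'
    (comb.foldl (fun r i => r.set i 1) (List.replicate bl.length (0:Int))) 0
    (fun (p : Nat × Nat) x => if x = 0 then (0, p.2) else (p.1 + 1, max p.2 (p.1 + 1))) (0, 0)]
  rw [foldl_eq_runFold]
  simp [decide_eq_true_eq]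

-- ===== VERDICT (by name: the statement is the Claim_ definition above) =====
theorem binary_permutations_spec : Claim_equal_binary_permutations := by
  intro bl _
  show binary_permutations bl = binary_permutations_alt bl
  rw [portA_eq]
  simp only [binary_permutations_alt]
  have hkn : bl.count 1 ≤ bl.length := List.count_le_length
  generalize hkg : bl.count 1 = k at *
  generalize hng : bl.length = n at *
  by_cases hk0 : k = 0
  · rw [hk0, combos_zero]
    simp
  · by_cases hk1 : k = 1
    · subst hk1
      rw [combos_one]
      simp only [if_neg (show ¬(1 < 1) by omega)]
      rw [PySem.List.foldl_append_singleton_eq_map, List.nil_append, List.map_map]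
      rw [if_neg (show (1:Nat) ≠ 0 by omega), show n - 1 + 1 = n by omega]
      apply List.map_congr_left
      intro i hi
      rw [List.mem_range] at hi
      simp only [Function.comp_apply]
      have h1 : ([i] : List Nat) = List.range' i 1 := by simp
      rw [h1, build_eq_ind _ n (by intro x hx; rw [List.mem_range'_1] at hx; omega),
        ind_interval n i 1 (by omega), show n - i - 1 = n - 1 - i by omega]
    · have hk2 : 2 ≤ k := by omega
      simp only [show (1 < k) = True from eq_true (by omega), if_true]
      rw [PySem.List.foldl_append_if, List.nil_append]
      have hfc : ((combosA (List.range n) k).filter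
            (fun cb => decide (runFold (cb.foldl (fun r i => r.set i 1) (List.replicate n (0:Int))) 0 0 = k))) =
          (combosA (List.range n) k).filter (isInt k) := by
        apply List.filter_congr
        intro cb hcb
        have hlt : ∀ i ∈ cb, i < n :=
          fun i hi => List.mem_range.mp ((combos_sublist _ _ _ hcb).1.subset hi)
        rw [build_eq_ind cb n hlt]
        have hiff := pred_iff n k hk2 cb hcb
        cases hi : isInt k cb <;> simp_all
      rw [hfc, List.range_eq_range', C3 n 0 k (by omega), List.map_map]
      rw [if_neg hk0, show n + 1 - k = n - k + 1 by omega]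
      apply List.map_congr_left
      intro j hj
      rw [List.mem_range] at hj
      simp only [Function.comp_apply, Nat.zero_add]
      rw [build_eq_ind _ n (by intro x hx; rw [List.mem_range'_1] at hx; omega),
        ind_interval n j k (by omega), show n - j - k = n - k - j by omega]
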